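-- pv_equiv track=rewrite | github.com/Rahulnisanth/Complete-Python-Hub | NPTEL.py | expanding
-- ===== SOURCE A (Python) =====
-- def expanding(l):
--     new_list = []
--     for i in range(len(l) - 1):  # type: ignore
--         if l[i] > l[i+1]:
--             new_list.append((l[i] - l[i+1]))
--         else:
--             new_list.append((l[i+1] - l[i]))
--     count = 0
--     for i in new_list:
--         if new_list.count(i) == 1:
--             count += 1
--     if count == (len(new_list)):  # type: ignore
--         sort_list = new_list[:]
--         sort_list.sort()
--         if (sort_list == new_list):
--             return (True)
--         else:
--             return (False)
--     else:
--         return (False)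
-- ===== SOURCE B (Python) =====
-- def expanding(l):
--     prev = None
--     cur = None
--     for x in l:
--         if cur is not None:
--             d = abs(x - cur)
--             if prev is not None and d <= prev:
--                 return False
--             prev = d
--         cur = x
--     return True
-- ===== Notes on version B (the rewrite author's own statement) =====
-- stated objective: simpler
-- what changed: Replaces A's build-the-diff-list, per-element duplicate counting (quadratic) and sort-and-compare with a single early-exit pass that checks each adjacent absolute difference strictly exceeds the previous one.
import Mathlib
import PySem

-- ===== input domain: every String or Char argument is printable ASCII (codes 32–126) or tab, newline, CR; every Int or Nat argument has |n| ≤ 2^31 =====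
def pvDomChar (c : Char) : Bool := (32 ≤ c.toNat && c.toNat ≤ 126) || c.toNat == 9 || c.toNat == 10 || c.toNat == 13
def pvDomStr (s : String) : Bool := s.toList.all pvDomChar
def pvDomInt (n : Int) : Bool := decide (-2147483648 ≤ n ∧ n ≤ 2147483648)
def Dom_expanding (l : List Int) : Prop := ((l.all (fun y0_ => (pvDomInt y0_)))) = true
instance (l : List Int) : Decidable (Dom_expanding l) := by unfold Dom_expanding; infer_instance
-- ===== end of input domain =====

-- B: one early-exit pass checking each adjacent abs-difference strictly exceeds the previous,
-- replacing A's build-list + duplicate-count + sort-and-compare (objective: simpler).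

-- ===== PORT A =====
def expanding (l : List Int) : Bool :=
  let newList := (PySem.List.pyRange 0 ((l.length : Int) - 1) 1).foldl
    (fun acc i =>
      if PySem.List.pyGetD l i 0 > PySem.List.pyGetD l (i + 1) 0 then
        acc ++ [PySem.List.pyGetD l i 0 - PySem.List.pyGetD l (i + 1) 0]
      else
        acc ++ [PySem.List.pyGetD l (i + 1) 0 - PySem.List.pyGetD l i 0]) []
  let count := newList.foldl
    (fun c i => if PySem.List.count newList i == 1 then c + 1 else c) (0 : Int)
  if count == (newList.length : Int) then
    let sortList := PySem.List.sorted newList (fun x => x) false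
    if sortList == newList then true else false
  else false

-- ===== PORT B =====
-- the 'for x in l' loop of Source B with its two state variables prev (last diff) and cur (last element)
def expandingAltGo (prev : Option Int) (cur : Int) (xs : List Int) : Bool :=
  match xs with
  | [] => true
  | x :: rest =>
    let d := |x - cur|
    match prev with
    | some p => if d ≤ p then false else expandingAltGo (some d) x rest
    | none => expandingAltGo (some d) x rest

def expanding_alt (l : List Int) : Bool :=
  match l with
  | [] => true
  | x :: xs => expandingAltGo none x xs

-- ===== PRECONDITION & SPEC =====
def Spec_expanding (l : List Int) (out : Bool) : Prop := out = expanding_alt l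
instance (l : List Int) (out : Bool) : Decidable (Spec_expanding l out) := by unfold Spec_expanding; infer_instance

-- ===== CLAIM (what is proved, stated in full; the proofs are below) =====
def Claim_equal_expanding : Prop := ∀ (l : List Int), Dom_expanding l → Spec_expanding l (expanding l)

-- ===== LEMMAS AND PROOFS =====

-- the list of adjacent absolute differences, common yardstick for both ports
def adjDiffs : List Int → List Int
  | [] => []
  | [_] => []
  | a :: b :: r => |a - b| :: adjDiffs (b :: r)

lemma adjDiffs_eq_zip (l : List Int) :
    adjDiffs l = (l.zip l.tail).map (fun p => |p.1 - p.2|) := by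
  match l with
  | [] => rfl
  | [_] => rfl
  | a :: b :: r => simp [adjDiffs, adjDiffs_eq_zip (b :: r)]

-- A's first loop builds exactly adjDiffs l
lemma expanding_newList (l : List Int) :
    (PySem.List.pyRange 0 ((l.length : Int) - 1) 1).foldl
      (fun acc i =>
        if PySem.List.pyGetD l i 0 > PySem.List.pyGetD l (i + 1) 0 then
          acc ++ [PySem.List.pyGetD l i 0 - PySem.List.pyGetD l (i + 1) 0]
        else
          acc ++ [PySem.List.pyGetD l (i + 1) 0 - PySem.List.pyGetD l i 0]) []
    = adjDiffs l := by
  have hbody : (fun (acc : List Int) (i : Int) =>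
      if PySem.List.pyGetD l i 0 > PySem.List.pyGetD l (i + 1) 0 then
        acc ++ [PySem.List.pyGetD l i 0 - PySem.List.pyGetD l (i + 1) 0]
      else
        acc ++ [PySem.List.pyGetD l (i + 1) 0 - PySem.List.pyGetD l i 0])
      = (fun acc i => acc ++ [|PySem.List.pyGetD l i 0 - PySem.List.pyGetD l (i + 1) 0|]) := by
    funext acc i
    split_ifs with h
    · rw [abs_of_pos (by omega)]
    · rw [abs_of_nonpos (by omega)]; ring_nf
  rw [hbody, PySem.List.foldl_append_singleton_eq_map, List.nil_append, adjDiffs_eq_zip]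
  apply List.ext_getElem
  · simp [PySem.List.length_pyRange_one, List.length_zip]
  · intro k h1 h2
    have hk : k + 1 < l.length := by
      simp [PySem.List.length_pyRange_one] at h1; omega
    simp only [List.getElem_map, PySem.List.getElem_pyRange_one, List.getElem_zip,
      List.getElem_tail, zero_add]
    have e1 : PySem.List.pyGetD l (k : Int) 0 = l[k] := by
      rw [PySem.List.pyGetD_natCast]; exact List.getD_eq_getElem l 0 (by omega)
    have e2 : PySem.List.pyGetD l ((k : Int) + 1) 0 = l[k + 1] := by
      have hcast : ((k : Int) + 1) = ((k + 1 : Nat) : Int) := by push_cast; ring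
      rw [hcast, PySem.List.pyGetD_natCast]
      exact List.getD_eq_getElem l 0 (by omega)
    rw [e1, e2]

-- A returns true iff adjDiffs l has no duplicates and equals its sorted copy, i.e. is strictly increasing
lemma expanding_eq_true_iff (l : List Int) :
    expanding l = true ↔ (adjDiffs l).Pairwise (· < ·) := by
  simp only [expanding, expanding_newList]
  rw [PySem.List.foldl_if_add_one, zero_add]
  by_cases hnd : (adjDiffs l).Nodup
  · have hcnt : (adjDiffs l).countP
        (fun i => PySem.List.count (adjDiffs l) i == 1) = (adjDiffs l).length := by
      rw [List.countP_eq_length]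
      intro a ha
      simp [PySem.List.count_eq, List.nodup_iff_count_eq_one.mp hnd a ha]
    rw [hcnt]
    simp only [beq_self_eq_true, if_true]
    by_cases hp : (adjDiffs l).Pairwise (· < ·)
    · have hle : (adjDiffs l).Pairwise (fun a b => (fun x : Int => x) a ≤ (fun x : Int => x) b) :=
        hp.imp (fun h => le_of_lt h)
      have hsort : PySem.List.sorted (adjDiffs l) (fun x : Int => x) = adjDiffs l := by
        apply PySem.List.sorted_eq_self_of_pairwise
        exact hle
      simp [hsort, hp]
    · have hne : PySem.List.sorted (adjDiffs l) (fun x => x) false ≠ adjDiffs l := by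
        intro he
        apply hp
        have hs := PySem.List.sorted_pairwise (adjDiffs l) (fun x : Int => x)
        rw [he] at hs
        exact (hs.and hnd).imp (fun h => lt_of_le_of_ne h.1 h.2)
      simp [hne, hp]
  · have hex : ¬ ∀ a ∈ adjDiffs l, (PySem.List.count (adjDiffs l) a == 1) = true := by
      intro hall
      exact hnd (List.nodup_iff_count_eq_one.mpr (fun a ha => by
        have h := hall a ha
        simpa [PySem.List.count_eq] using h))
    have hcnt : (adjDiffs l).countP
        (fun i => PySem.List.count (adjDiffs l) i == 1) ≠ (adjDiffs l).length := by
      intro he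
      exact hex (List.countP_eq_length.mp he)
    have hp : ¬ (adjDiffs l).Pairwise (· < ·) := by
      intro hp
      exact hnd (hp.imp (fun h => ne_of_lt h))
    have hb : (((adjDiffs l).countP
        (fun i => PySem.List.count (adjDiffs l) i == 1) : Int) == ((adjDiffs l).length : Int))
        = false := by
      simp only [beq_eq_false_iff_ne, ne_eq, Nat.cast_inj]
      exact hcnt
    have hniff : ¬ (((((adjDiffs l).countP
        (fun i => PySem.List.count (adjDiffs l) i == 1)) : Int) == ((adjDiffs l).length : Int))
        = true) := by
      rw [hb]; simp
    rw [if_neg hniff]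
    simp [hp]

-- B's loop with a previous diff p succeeds iff p :: remaining diffs is a <-chain
lemma expandingAltGo_some_iff (xs : List Int) : ∀ (cur p : Int),
    (expandingAltGo (some p) cur xs = true ↔
      List.IsChain (· < ·) (p :: adjDiffs (cur :: xs))) := by
  induction xs with
  | nil =>
    intro cur p
    simp [expandingAltGo, adjDiffs]
  | cons x rest ih =>
    intro cur p
    simp only [expandingAltGo, adjDiffs, List.isChain_cons_cons]
    by_cases h : |x - cur| ≤ p
    · have hnlt : ¬ p < |cur - x| := by rw [abs_sub_comm]; omega
      simp [h, hnlt]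
    · have hlt : p < |cur - x| := by rw [abs_sub_comm]; omega
      rw [if_neg h, ih x (|x - cur|), abs_sub_comm]
      simp [hlt]

lemma expandingAltGo_none_iff (cur : Int) (xs : List Int) :
    (expandingAltGo none cur xs = true ↔ List.IsChain (· < ·) (adjDiffs (cur :: xs))) := by
  match xs with
  | [] => simp [expandingAltGo, adjDiffs]
  | x :: rest =>
    show (expandingAltGo (some (|x - cur|)) x rest = true ↔ _)
    rw [expandingAltGo_some_iff rest x (|x - cur|), abs_sub_comm]
    rfl

lemma expanding_alt_eq_true_iff (l : List Int) :
    expanding_alt l = true ↔ (adjDiffs l).Pairwise (· < ·) := by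
  match l with
  | [] => simp [expanding_alt, adjDiffs]
  | x :: xs =>
    rw [expanding_alt, expandingAltGo_none_iff, List.isChain_iff_pairwise]

-- ===== VERDICT (by name: the statement is the Claim_ definition above) =====
theorem expanding_spec : Claim_equal_expanding := by
  intro l _
  unfold Spec_expanding
  rw [Bool.eq_iff_iff, expanding_eq_true_iff, expanding_alt_eq_true_iff]
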